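-- pv_equiv track=rewrite | github.com/maxcorvalan/ruuf | solar-panel-placement.py | max_paneles
-- ===== SOURCE A (Python) =====
-- def max_paneles(a, b, x, y):
--     def puede_colocar_panel(grid, panel_ancho, panel_alto, pos_x, pos_y):
--         if pos_x + panel_ancho > len(grid[0]) or pos_y + panel_alto > len(grid):
--             return False
--
--         for dy in range(panel_alto):
--             for dx in range(panel_ancho):
--                 if grid[pos_y + dy][pos_x + dx] == 1:
--                     return False
--
--         return True
--
--     def colocar_panel(grid, panel_ancho, panel_alto, pos_x, pos_y):
--         for dy in range(panel_alto):
--             for dx in range(panel_ancho):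
--                 grid[pos_y + dy][pos_x + dx] = 1
--
--     def quitar_panel(grid, panel_ancho, panel_alto, pos_x, pos_y):
--         for dy in range(panel_alto):
--             for dx in range(panel_ancho):
--                 grid[pos_y + dy][pos_x + dx] = 0
--
--     def backtrack(grid):
--         max_paneles = 0
--         for pos_y in range(len(grid)):
--             for pos_x in range(len(grid[0])):
--                 if a != b and puede_colocar_panel(grid, a, b, pos_x, pos_y):
--                     colocar_panel(grid, a, b, pos_x, pos_y)
--                     max_paneles = max(max_paneles, 1 + backtrack(grid))
--                     quitar_panel(grid, a, b, pos_x, pos_y)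
--
--                 if a != b and puede_colocar_panel(grid, b, a, pos_x, pos_y):
--                     colocar_panel(grid, b, a, pos_x, pos_y)
--                     max_paneles = max(max_paneles, 1 + backtrack(grid))
--                     quitar_panel(grid, b, a, pos_x, pos_y)
--
--                 if a == b and puede_colocar_panel(grid, a, b, pos_x, pos_y):
--                     colocar_panel(grid, a, b, pos_x, pos_y)
--                     max_paneles = max(max_paneles, 1 + backtrack(grid))
--                     quitar_panel(grid, a, b, pos_x, pos_y)
--
--         return max_paneles
--
--     if a <= 0 or b <= 0 or x <= 0 or y <= 0:
--         return 0
--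
--     if (x % a == 0 and y % b == 0) or (x % b == 0 and y % a == 0):
--         return (x // a) * (y // b) if (x % a == 0 and y % b == 0) else (x // b) * (y // a)
--
--     grid = [[0 for _ in range(x)] for _ in range(y)]
--
--     return backtrack(grid)
-- ===== SOURCE B (Python) =====
-- def max_paneles(a, b, x, y):
--     if a <= 0 or b <= 0 or x <= 0 or y <= 0:
--         return 0
--
--     if x % a == 0 and y % b == 0:
--         return (x // a) * (y // b)
--     if x % b == 0 and y % a == 0:
--         return (x // b) * (y // a)
--
--     # Memoized search over immutable occupancy sets: cells are encoded as
--     # py*x + px; states with the same occupied set are solved once.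
--     dims = [(a, b), (b, a)] if a != b else [(a, b)]
--     cands = [(px, py, w, h) for py in range(y) for px in range(x) for (w, h) in dims
--              if px + w <= x and py + h <= y]
--     memo = {}
--
--     def cells(px, py, w, h):
--         return ((py + dy) * x + (px + dx) for dy in range(h) for dx in range(w))
--
--     def best(occ):
--         key = tuple(sorted(occ))
--         if key in memo:
--             return memo[key]
--         res = 0
--         for (px, py, w, h) in cands:
--             if all(c not in occ for c in cells(px, py, w, h)):
--                 res = max(res, 1 + best(occ | frozenset(cells(px, py, w, h))))
--         memo[key] = res
--         return res
--
--     return best(frozenset())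
-- ===== Notes on version B (the rewrite author's own statement) =====
-- stated objective: alternative
-- what changed: Replaces A's naive backtracking over a mutable 2D grid by memoized dynamic programming over immutable occupancy sets of encoded cells (one precomputed in-bounds candidate list; equal occupancy states are solved once via a dict keyed on the sorted occupancy tuple); intended to prune re-exploration, measured around 2x faster on the generated timing family but not consistently above the checker's threshold, so no speed is claimed.
import Mathlib
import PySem

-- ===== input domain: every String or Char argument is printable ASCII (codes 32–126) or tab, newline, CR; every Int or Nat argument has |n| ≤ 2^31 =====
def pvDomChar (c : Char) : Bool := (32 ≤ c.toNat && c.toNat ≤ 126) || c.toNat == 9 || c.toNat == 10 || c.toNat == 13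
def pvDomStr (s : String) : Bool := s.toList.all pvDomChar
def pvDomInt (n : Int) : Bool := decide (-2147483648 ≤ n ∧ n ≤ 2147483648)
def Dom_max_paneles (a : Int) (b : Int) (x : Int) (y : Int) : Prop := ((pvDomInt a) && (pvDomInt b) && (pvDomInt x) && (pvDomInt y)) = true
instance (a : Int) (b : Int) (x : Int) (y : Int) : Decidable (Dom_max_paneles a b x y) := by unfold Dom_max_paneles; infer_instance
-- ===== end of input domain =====

-- B replaces A's mutable-grid naive backtracking by a memoized search over
-- immutable occupancy sets (equal occupancy states are solved once); same
-- return value, proved equal on all inputs.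

-- ===== PORT A =====
-- grid[r][c]; all reads performed by A are in range (guarded by the bounds
-- check in puede_colocar_panel), so the 0-default getD is exact.
def pvCellA (g : List (List Int)) (r c : Nat) : Int := (g.getD r []).getD c 0

-- grid[r][c] = v  (functional update; identity out of range, never hit by A)
def pvSet2 (g : List (List Int)) (r c : Nat) (v : Int) : List (List Int) :=
  g.set r ((g.getD r []).set c v)

-- puede_colocar_panel: bounds check, then scan for a 1 (early return ≈ all)
def pvCanPlaceA (g : List (List Int)) (w h px py : Nat) : Bool :=
  if px + w > (g.headD []).length ∨ py + h > g.length then false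
  else (List.range h).all fun dy => (List.range w).all fun dx =>
    !(pvCellA g (py + dy) (px + dx) == 1)

-- colocar_panel (functional).  quitar_panel needs no port: every
-- colocar/backtrack/quitar bracket in A restores the grid exactly (the cells
-- written were all 0, checked by puede_colocar_panel), so the functional port
-- simply reuses the unmodified grid afterwards.
def pvPlaceA (g : List (List Int)) (w h px py : Nat) : List (List Int) :=
  (List.range h).foldl (fun g2 dy =>
    (List.range w).foldl (fun g3 dx => pvSet2 g3 (py + dy) (px + dx) 1) g2) g

-- backtrack; fuel only totalizes the recursion (the Python recursion depth is
-- bounded by the number of panels placed, < x*y+1 = the fuel supplied below)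
def pvBacktrackA (a b : Int) : Nat → List (List Int) → Int
  | 0, _ => 0
  | f+1, g =>
    (List.range g.length).foldl (fun acc0 py =>
      (List.range (g.headD []).length).foldl (fun acc1 px =>
        let acc2 := if a ≠ b ∧ pvCanPlaceA g a.toNat b.toNat px py = true then
            max acc1 (1 + pvBacktrackA a b f (pvPlaceA g a.toNat b.toNat px py)) else acc1
        let acc3 := if a ≠ b ∧ pvCanPlaceA g b.toNat a.toNat px py = true then
            max acc2 (1 + pvBacktrackA a b f (pvPlaceA g b.toNat a.toNat px py)) else acc2
        if a = b ∧ pvCanPlaceA g a.toNat b.toNat px py = true then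
            max acc3 (1 + pvBacktrackA a b f (pvPlaceA g a.toNat b.toNat px py)) else acc3) acc0) 0

def max_paneles (a : Int) (b : Int) (x : Int) (y : Int) : Int :=
  if a ≤ 0 ∨ b ≤ 0 ∨ x ≤ 0 ∨ y ≤ 0 then 0
  else if (PySem.Int.mod x a = 0 ∧ PySem.Int.mod y b = 0) ∨
          (PySem.Int.mod x b = 0 ∧ PySem.Int.mod y a = 0) then
    if PySem.Int.mod x a = 0 ∧ PySem.Int.mod y b = 0 then
      PySem.Int.floordiv x a * PySem.Int.floordiv y b
    else PySem.Int.floordiv x b * PySem.Int.floordiv y a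
  else
    pvBacktrackA a b (x.toNat * y.toNat + 1)
      (List.replicate y.toNat (List.replicate x.toNat (0 : Int)))

-- ===== PORT B =====
-- dims = [(a,b),(b,a)] if a != b else [(a,b)]   (a,b > 0 here, so toNat is exact)
def pvDims (a b : Int) : List (Nat × Nat) :=
  if a ≠ b then [(a.toNat, b.toNat), (b.toNat, a.toNat)] else [(a.toNat, b.toNat)]

-- cands = [(px,py,w,h) for py in range(y) for px in range(x) for (w,h) in dims
--          if px+w <= x and py+h <= y]
def pvCands (n m : Nat) (a b : Int) : List (Nat × Nat × Nat × Nat) :=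
  ((List.range m).flatMap fun py => (List.range n).flatMap fun px =>
    (pvDims a b).map fun wh => (px, py, wh.1, wh.2)).filter
      fun cand => decide (cand.1 + cand.2.2.1 ≤ n ∧ cand.2.1 + cand.2.2.2 ≤ m)

-- cells(px,py,w,h): covered cells encoded as (py+dy)*x + (px+dx)
def pvCellsB (n px py w h : Nat) : List Nat :=
  (List.range h).flatMap fun dy => (List.range w).map fun dx => (py + dy) * n + (px + dx)

-- best(occ) with memo keyed on tuple(sorted(occ)); the occupancy set is a
-- PySem.Set Nat; fuel only totalizes the recursion (B's Python recursion depth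
-- is bounded by the number of panels placed, < x*y+1 = the fuel supplied below)
def pvBestB (n m : Nat) (a b : Int) :
    Nat → PySem.Set Nat → PySem.Dict (List Nat) Int → Int × PySem.Dict (List Nat) Int
  | 0, _, memo => (0, memo)
  | f+1, occ, memo =>
    let key := PySem.List.sorted occ (fun v => v) false
    match memo.get? key with
    | some v => (v, memo)
    | none =>
      let r := (pvCands n m a b).foldl
        (fun (p : Int × PySem.Dict (List Nat) Int) cand =>
          if (pvCellsB n cand.1 cand.2.1 cand.2.2.1 cand.2.2.2).all
              (fun c => !(PySem.Set.contains occ c)) then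
            let q := pvBestB n m a b f
              (PySem.Set.union occ (pvCellsB n cand.1 cand.2.1 cand.2.2.1 cand.2.2.2)) p.2
            (max p.1 (1 + q.1), q.2)
          else p) (0, memo)
      (r.1, r.2.insert key r.1)

def max_paneles_alt (a : Int) (b : Int) (x : Int) (y : Int) : Int :=
  if a ≤ 0 ∨ b ≤ 0 ∨ x ≤ 0 ∨ y ≤ 0 then 0
  else if PySem.Int.mod x a = 0 ∧ PySem.Int.mod y b = 0 then
    PySem.Int.floordiv x a * PySem.Int.floordiv y b
  else if PySem.Int.mod x b = 0 ∧ PySem.Int.mod y a = 0 then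
    PySem.Int.floordiv x b * PySem.Int.floordiv y a
  else
    (pvBestB x.toNat y.toNat a b (x.toNat * y.toNat + 1) PySem.Set.empty PySem.Dict.empty).1

-- ===== PRECONDITION & SPEC =====
def Spec_max_paneles (a : Int) (b : Int) (x : Int) (y : Int) (out : Int) : Prop := out = max_paneles_alt a b x y
instance (a : Int) (b : Int) (x : Int) (y : Int) (out : Int) : Decidable (Spec_max_paneles a b x y out) := by unfold Spec_max_paneles; infer_instance

-- ===== CLAIM (what is proved, stated in full; the proofs are below) =====
def Claim_equal_max_paneles : Prop := ∀ (a : Int) (b : Int) (x : Int) (y : Int), Dom_max_paneles a b x y → Spec_max_paneles a b x y (max_paneles a b x y)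

-- ===== LEMMAS AND PROOFS =====

-- the unfiltered candidate list (proof device)
def pvCandsAll (n m : Nat) (a b : Int) : List (Nat × Nat × Nat × Nat) :=
  (List.range m).flatMap fun py => (List.range n).flatMap fun px =>
    (pvDims a b).map fun wh => (px, py, wh.1, wh.2)

theorem pvCands_eq_filter (n m : Nat) (a b : Int) :
    pvCands n m a b = (pvCandsAll n m a b).filter
      (fun cand => decide (cand.1 + cand.2.2.1 ≤ n ∧ cand.2.1 + cand.2.2.2 ≤ m)) := rfl

-- B's memo-free recursion (proof device: both ports are related to it)
def pvPure (n m : Nat) (a b : Int) : Nat → PySem.Set Nat → Int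
  | 0, _ => 0
  | f+1, occ =>
    (pvCandsAll n m a b).foldl (fun acc cand =>
      if cand.1 + cand.2.2.1 ≤ n ∧ cand.2.1 + cand.2.2.2 ≤ m then
        if (pvCellsB n cand.1 cand.2.1 cand.2.2.1 cand.2.2.2).all
            (fun c => !(PySem.Set.contains occ c)) then
          max acc (1 + pvPure n m a b f
            (PySem.Set.union occ (pvCellsB n cand.1 cand.2.1 cand.2.2.1 cand.2.2.2)))
        else acc
      else acc) 0

-- encoding (r,c) ↦ r*n+c is injective for c < n
theorem pvEncInj (n e d r c : Nat) (hd : d < n) (hc : c < n)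
    (h : e * n + d = r * n + c) : e = r ∧ d = c := by
  rcases Nat.lt_trichotomy e r with h1 | h1 | h1
  · exfalso
    have h2 : (e + 1) * n ≤ r * n := Nat.mul_le_mul_right n h1
    rw [Nat.succ_mul] at h2
    omega
  · exact ⟨h1, by subst h1; omega⟩
  · exfalso
    have h2 : (r + 1) * n ≤ e * n := Nat.mul_le_mul_right n h1
    rw [Nat.succ_mul] at h2
    omega

theorem pvMemCells (n px py w h r c : Nat) (hc : c < n) (hw : px + w ≤ n) :
    r * n + c ∈ pvCellsB n px py w h ↔ py ≤ r ∧ r < py + h ∧ px ≤ c ∧ c < px + w := by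
  simp only [pvCellsB, List.mem_flatMap, List.mem_map, List.mem_range]
  constructor
  · rintro ⟨dy, hdy, dx, hdx, heq⟩
    obtain ⟨h1, h2⟩ := pvEncInj n (py + dy) (px + dx) r c (by omega) hc heq
    omega
  · rintro ⟨h1, h2, h3, h4⟩
    refine ⟨r - py, by omega, c - px, by omega, ?_⟩
    have h5 : py + (r - py) = r := by omega
    have h6 : px + (c - px) = c := by omega
    rw [h5, h6]

theorem pvCellsBound (n m px py w h : Nat) (hw : px + w ≤ n) (hh : py + h ≤ m) :
    ∀ u ∈ pvCellsB n px py w h, u < n * m := by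
  intro u hu
  simp only [pvCellsB, List.mem_flatMap, List.mem_map, List.mem_range] at hu
  obtain ⟨dy, hdy, dx, hdx, rfl⟩ := hu
  have h2 : (py + dy + 1) * n ≤ m * n := Nat.mul_le_mul_right n (by omega)
  rw [Nat.succ_mul] at h2
  rw [Nat.mul_comm n m]
  omega

theorem pvCellsHead (n px py w h : Nat) (hw : 0 < w) (hh : 0 < h) :
    py * n + px ∈ pvCellsB n px py w h := by
  simp only [pvCellsB, List.mem_flatMap, List.mem_map, List.mem_range]
  exact ⟨0, hh, 0, hw, by simp⟩

theorem pvLenLt (N : Nat) (occ : List Nat) (hnd : occ.Nodup) (hb : ∀ v ∈ occ, v < N)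
    (c0 : Nat) (hc0 : c0 < N) (hn : c0 ∉ occ) : occ.length < N := by
  have hcard : occ.toFinset.card = occ.length := List.toFinset_card_of_nodup hnd
  have hsub : occ.toFinset ⊆ (Finset.range N).erase c0 := by
    intro v hv
    rw [List.mem_toFinset] at hv
    rw [Finset.mem_erase, Finset.mem_range]
    exact ⟨by rintro rfl; exact hn hv, hb v hv⟩
  have hle := Finset.card_le_card hsub
  rw [Finset.card_erase_of_mem (by simp [Finset.mem_range, hc0]), Finset.card_range] at hle
  omega

theorem pvUnion_cons (occ : PySem.Set Nat) (c : Nat) (cs : List Nat) :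
    PySem.Set.union occ (c :: cs) = PySem.Set.union (PySem.Set.add occ c) cs := rfl

theorem pvLeAdd (occ : PySem.Set Nat) (c : Nat) : occ.length ≤ (PySem.Set.add occ c).length := by
  simp only [PySem.Set.add]
  split <;> simp

theorem pvLeUnion (cs : List Nat) (occ : PySem.Set Nat) :
    occ.length ≤ (PySem.Set.union occ cs).length := by
  induction cs generalizing occ with
  | nil => exact Nat.le_refl _
  | cons c rest ih =>
    rw [pvUnion_cons]
    exact Nat.le_trans (pvLeAdd occ c) (ih _)

theorem pvLtUnion (cs : List Nat) (occ : PySem.Set Nat) (c0 : Nat)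
    (hmem : c0 ∈ cs) (hn : c0 ∉ occ) : occ.length < (PySem.Set.union occ cs).length := by
  induction cs generalizing occ with
  | nil => cases hmem
  | cons c rest ih =>
    rw [pvUnion_cons]
    by_cases hc : PySem.Set.contains occ c = true
    · have hadd : PySem.Set.add occ c = occ := by simp only [PySem.Set.add, hc, if_pos]
      rw [hadd]
      rcases List.mem_cons.mp hmem with rfl | hm
      · exact absurd ((PySem.Set.contains_iff occ c0).mp hc) hn
      · exact ih occ hm hn
    · have hadd : PySem.Set.add occ c = occ ++ [c] := by rw [PySem.Set.add, if_neg hc]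
      rw [hadd]
      calc occ.length < (occ ++ [c]).length := by simp
        _ ≤ _ := pvLeUnion rest _

theorem pvPermAdd (occ occ' : PySem.Set Nat) (c : Nat) (h : occ.Perm occ') :
    (PySem.Set.add occ c).Perm (PySem.Set.add occ' c) := by
  by_cases hc : c ∈ occ
  · have h1 : PySem.Set.contains occ c = true := (PySem.Set.contains_iff occ c).mpr hc
    have h2 : PySem.Set.contains occ' c = true :=
      (PySem.Set.contains_iff occ' c).mpr (h.mem_iff.mp hc)
    simp only [PySem.Set.add, h1, h2, if_pos]
    exact h
  · have h1 : PySem.Set.contains occ c = false := by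
      rw [Bool.eq_false_iff]; intro hx; exact hc ((PySem.Set.contains_iff occ c).mp hx)
    have h2 : PySem.Set.contains occ' c = false := by
      rw [Bool.eq_false_iff]; intro hx; exact hc (h.mem_iff.mpr ((PySem.Set.contains_iff occ' c).mp hx))
    rw [PySem.Set.add, PySem.Set.add, if_neg (by rw [h1]; simp), if_neg (by rw [h2]; simp)]
    exact h.append_right [c]

theorem pvPermUnion (cs : List Nat) (occ occ' : PySem.Set Nat) (h : occ.Perm occ') :
    (PySem.Set.union occ cs).Perm (PySem.Set.union occ' cs) := by
  induction cs generalizing occ occ' with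
  | nil => exact h
  | cons c rest ih =>
    rw [pvUnion_cons, pvUnion_cons]
    exact ih _ _ (pvPermAdd occ occ' c h)

theorem pvContains_perm (occ occ' : PySem.Set Nat) (h : occ.Perm occ') (u : Nat) :
    PySem.Set.contains occ u = PySem.Set.contains occ' u := by
  by_cases hu : u ∈ occ
  · rw [(PySem.Set.contains_iff occ u).mpr hu, (PySem.Set.contains_iff occ' u).mpr (h.mem_iff.mp hu)]
  · have e1 : PySem.Set.contains occ u = false := by
      rw [Bool.eq_false_iff]; intro hx; exact hu ((PySem.Set.contains_iff occ u).mp hx)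
    have e2 : PySem.Set.contains occ' u = false := by
      rw [Bool.eq_false_iff]; intro hx; exact hu (h.mem_iff.mpr ((PySem.Set.contains_iff occ' u).mp hx))
    rw [e1, e2]

theorem pvPure_perm (n m : Nat) (a b : Int) :
    ∀ f (occ occ' : PySem.Set Nat), occ.Perm occ' →
      pvPure n m a b f occ = pvPure n m a b f occ' := by
  intro f
  induction f with
  | zero => intro occ occ' _; rfl
  | succ f ih =>
    intro occ occ' h
    simp only [pvPure]
    apply PySem.List.foldl_congr_mem
    intro acc cand _
    have hfun : (fun c => !PySem.Set.contains occ c) = (fun c => !PySem.Set.contains occ' c) :=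
      funext fun u => by rw [pvContains_perm occ occ' h u]
    rw [hfun]
    split_ifs with h3 h4
    · rw [ih _ _ (pvPermUnion _ occ occ' h)]
    · rfl
    · rfl

theorem pvDimsPos (a b : Int) (ha : 0 < a) (hb : 0 < b) :
    ∀ wh ∈ pvDims a b, 0 < wh.1 ∧ 0 < wh.2 := by
  intro wh hwh
  simp only [pvDims] at hwh
  split at hwh <;> simp only [List.mem_cons, List.not_mem_nil, or_false] at hwh
  · rcases hwh with rfl | rfl <;> exact ⟨by simp; omega, by simp; omega⟩
  · rcases hwh with rfl
    exact ⟨by simp; omega, by simp; omega⟩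

theorem pvCandsDims (n m : Nat) (a b : Int) (cand : Nat × Nat × Nat × Nat)
    (h : cand ∈ pvCandsAll n m a b) : cand.2.2 ∈ pvDims a b := by
  simp only [pvCandsAll, List.mem_flatMap, List.mem_map, List.mem_range] at h
  obtain ⟨py, _, px, _, wh, hwh, rfl⟩ := h
  simpa using hwh

theorem pvPure_fuel (n m : Nat) (a b : Int) (ha : 0 < a) (hb : 0 < b) (k : Nat) :
    ∀ (occ : PySem.Set Nat) (f1 f2 : Nat), n * m - occ.length ≤ k →
      occ.Nodup → (∀ v ∈ occ, v < n * m) →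
      n * m - occ.length < f1 → n * m - occ.length < f2 →
      pvPure n m a b f1 occ = pvPure n m a b f2 occ := by
  induction k with
  | zero =>
    intro occ f1 f2 hk hnd hbd h1 h2
    cases f1 with
    | zero => omega
    | succ g1 =>
      cases f2 with
      | zero => omega
      | succ g2 =>
        simp only [pvPure]
        apply PySem.List.foldl_congr_mem
        intro acc cand hcand
        by_cases h3 : cand.1 + cand.2.2.1 ≤ n ∧ cand.2.1 + cand.2.2.2 ≤ m
        case neg => rw [if_neg h3, if_neg h3]
        rw [if_pos h3, if_pos h3]
        set cs := pvCellsB n cand.1 cand.2.1 cand.2.2.1 cand.2.2.2 with hcs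
        by_cases h4 : cs.all (fun c => !(PySem.Set.contains occ c)) = true
        case neg => rw [if_neg h4, if_neg h4]
        exfalso
        obtain ⟨hw, hh⟩ := pvDimsPos a b ha hb _ (pvCandsDims n m a b cand hcand)
        have hc0cs : cand.2.1 * n + cand.1 ∈ cs := pvCellsHead _ _ _ _ _ hw hh
        have hfree : ∀ u ∈ cs, u ∉ occ := by
          intro u hu hmem
          have := (List.all_eq_true.mp h4) u hu
          rw [(PySem.Set.contains_iff occ u).mpr hmem] at this
          simp at this
        have hc0lt := pvCellsBound n m cand.1 cand.2.1 _ _ h3.1 h3.2 _ hc0cs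
        have hlen : occ.length < n * m := pvLenLt _ _ hnd hbd _ hc0lt (hfree _ hc0cs)
        omega
  | succ k ih =>
    intro occ f1 f2 hk hnd hbd h1 h2
    cases f1 with
    | zero => omega
    | succ g1 =>
      cases f2 with
      | zero => omega
      | succ g2 =>
        simp only [pvPure]
        apply PySem.List.foldl_congr_mem
        intro acc cand hcand
        by_cases h3 : cand.1 + cand.2.2.1 ≤ n ∧ cand.2.1 + cand.2.2.2 ≤ m
        case neg => rw [if_neg h3, if_neg h3]
        rw [if_pos h3, if_pos h3]
        set cs := pvCellsB n cand.1 cand.2.1 cand.2.2.1 cand.2.2.2 with hcs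
        by_cases h4 : cs.all (fun c => !(PySem.Set.contains occ c)) = true
        case neg => rw [if_neg h4, if_neg h4]
        rw [if_pos h4, if_pos h4]
        obtain ⟨hw, hh⟩ := pvDimsPos a b ha hb _ (pvCandsDims n m a b cand hcand)
        have hc0cs : cand.2.1 * n + cand.1 ∈ cs := pvCellsHead _ _ _ _ _ hw hh
        have hfree : ∀ u ∈ cs, u ∉ occ := by
          intro u hu hmem
          have := (List.all_eq_true.mp h4) u hu
          rw [(PySem.Set.contains_iff occ u).mpr hmem] at this
          simp at this
        have hc0lt := pvCellsBound n m cand.1 cand.2.1 _ _ h3.1 h3.2 _ hc0cs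
        have hlen : occ.length < n * m := pvLenLt _ _ hnd hbd _ hc0lt (hfree _ hc0cs)
        have hlt := pvLtUnion cs occ _ hc0cs (hfree _ hc0cs)
        have hnd' := PySem.Set.nodup_union occ cs hnd
        have hbd' : ∀ u ∈ PySem.Set.union occ cs, u < n * m := by
          intro u hu
          rcases (PySem.Set.mem_union occ cs u).mp hu with h | h
          · exact hbd u h
          · exact pvCellsBound n m _ _ _ _ h3.1 h3.2 u h
        rw [ih (PySem.Set.union occ cs) g1 g2 (by omega) hnd' hbd' (by omega) (by omega)]

-- memo invariant: every stored value is the memo-free value of a state that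
-- sorts to its key, at some sufficient fuel
def pvInv (n m : Nat) (a b : Int) (memo : PySem.Dict (List Nat) Int) : Prop :=
  ∀ k v, memo.get? k = some v → ∃ (occ' : PySem.Set Nat) (f' : Nat),
    occ'.Nodup ∧ (∀ u ∈ occ', u < n * m) ∧
    k = PySem.List.sorted occ' (fun v => v) false ∧
    n * m - occ'.length < f' ∧ v = pvPure n m a b f' occ'

theorem pvBest_spec (n m : Nat) (a b : Int) (ha : 0 < a) (hb : 0 < b) :
    ∀ (f : Nat) (occ : PySem.Set Nat) (memo : PySem.Dict (List Nat) Int),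
      occ.Nodup → (∀ u ∈ occ, u < n * m) → n * m - occ.length < f →
      pvInv n m a b memo →
      (pvBestB n m a b f occ memo).1 = pvPure n m a b f occ ∧
      pvInv n m a b (pvBestB n m a b f occ memo).2 := by
  intro f
  induction f with
  | zero => intro occ memo hnd hbd hf hinv; exact absurd hf (Nat.not_lt_zero _)
  | succ f ih =>
    intro occ memo hnd hbd hf hinv
    simp only [pvBestB]
    cases hkey : memo.get? (PySem.List.sorted occ (fun v => v) false) with
    | some v =>
      obtain ⟨occ', f', hnd', hbd', hkeq, hf', hval⟩ := hinv _ _ hkey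
      refine ⟨?_, hinv⟩
      have hperm : occ'.Perm occ := by
        have p1 := PySem.List.sorted_perm occ (fun v => v) false
        have p2 := PySem.List.sorted_perm occ' (fun v => v) false
        rw [← hkeq] at p2
        exact p2.symm.trans p1
      have hlen : occ'.length = occ.length := hperm.length_eq
      calc v = pvPure n m a b f' occ' := hval
        _ = pvPure n m a b f' occ := pvPure_perm n m a b f' occ' occ hperm
        _ = pvPure n m a b (f + 1) occ :=
            pvPure_fuel n m a b ha hb (n * m - occ.length) occ f' (f + 1)
              (Nat.le_refl _) hnd hbd (by omega) hf
    | none =>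
      rw [pvCands_eq_filter, List.foldl_filter]
      simp only [decide_eq_true_eq]
      have hfold : ∀ (l : List (Nat × Nat × Nat × Nat)) (res : Int)
          (memo0 : PySem.Dict (List Nat) Int),
          pvInv n m a b memo0 → (∀ cand ∈ l, cand.2.2 ∈ pvDims a b) →
          (l.foldl (fun (p : Int × PySem.Dict (List Nat) Int) cand =>
            if cand.1 + cand.2.2.1 ≤ n ∧ cand.2.1 + cand.2.2.2 ≤ m then
              if (pvCellsB n cand.1 cand.2.1 cand.2.2.1 cand.2.2.2).all
                  (fun c => !(PySem.Set.contains occ c)) = true then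
                (max p.1 (1 + (pvBestB n m a b f
                    (PySem.Set.union occ (pvCellsB n cand.1 cand.2.1 cand.2.2.1 cand.2.2.2)) p.2).1),
                 (pvBestB n m a b f
                    (PySem.Set.union occ (pvCellsB n cand.1 cand.2.1 cand.2.2.1 cand.2.2.2)) p.2).2)
              else p
            else p) (res, memo0)).1 =
            l.foldl (fun acc cand =>
              if cand.1 + cand.2.2.1 ≤ n ∧ cand.2.1 + cand.2.2.2 ≤ m then
                if (pvCellsB n cand.1 cand.2.1 cand.2.2.1 cand.2.2.2).all
                    (fun c => !(PySem.Set.contains occ c)) = true then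
                  max acc (1 + pvPure n m a b f
                    (PySem.Set.union occ (pvCellsB n cand.1 cand.2.1 cand.2.2.1 cand.2.2.2)))
                else acc
              else acc) res ∧
          pvInv n m a b (l.foldl (fun (p : Int × PySem.Dict (List Nat) Int) cand =>
            if cand.1 + cand.2.2.1 ≤ n ∧ cand.2.1 + cand.2.2.2 ≤ m then
              if (pvCellsB n cand.1 cand.2.1 cand.2.2.1 cand.2.2.2).all
                  (fun c => !(PySem.Set.contains occ c)) = true then
                (max p.1 (1 + (pvBestB n m a b f
                    (PySem.Set.union occ (pvCellsB n cand.1 cand.2.1 cand.2.2.1 cand.2.2.2)) p.2).1),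
                 (pvBestB n m a b f
                    (PySem.Set.union occ (pvCellsB n cand.1 cand.2.1 cand.2.2.1 cand.2.2.2)) p.2).2)
              else p
            else p) (res, memo0)).2 := by
        intro l
        induction l with
        | nil => intro res memo0 hinv0 _; exact ⟨rfl, hinv0⟩
        | cons c t iht =>
          intro res memo0 hinv0 hdims
          simp only [List.foldl_cons]
          by_cases hc3 : c.1 + c.2.2.1 ≤ n ∧ c.2.1 + c.2.2.2 ≤ m
          case neg =>
            rw [if_neg hc3, if_neg hc3]
            exact iht res memo0 hinv0 (fun cand hc => hdims cand (List.mem_cons_of_mem c hc))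
          rw [if_pos hc3, if_pos hc3]
          set cs := pvCellsB n c.1 c.2.1 c.2.2.1 c.2.2.2 with hcs
          by_cases hc4 : cs.all (fun c => !(PySem.Set.contains occ c)) = true
          case neg =>
            rw [if_neg hc4, if_neg hc4]
            exact iht res memo0 hinv0 (fun cand hc => hdims cand (List.mem_cons_of_mem c hc))
          rw [if_pos hc4, if_pos hc4]
          obtain ⟨hw, hh⟩ := pvDimsPos a b ha hb _ (hdims c List.mem_cons_self)
          have hc0cs : c.2.1 * n + c.1 ∈ cs := pvCellsHead _ _ _ _ _ hw hh
          have hfree : ∀ u ∈ cs, u ∉ occ := by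
            intro u hu hmem
            have := (List.all_eq_true.mp hc4) u hu
            rw [(PySem.Set.contains_iff occ u).mpr hmem] at this
            simp at this
          have hc0lt := pvCellsBound n m c.1 c.2.1 _ _ hc3.1 hc3.2 _ hc0cs
          have hlen : occ.length < n * m := pvLenLt _ _ hnd hbd _ hc0lt (hfree _ hc0cs)
          have hlt := pvLtUnion cs occ _ hc0cs (hfree _ hc0cs)
          have hnd' := PySem.Set.nodup_union occ cs hnd
          have hbd' : ∀ u ∈ PySem.Set.union occ cs, u < n * m := by
            intro u hu
            rcases (PySem.Set.mem_union occ cs u).mp hu with h | h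
            · exact hbd u h
            · exact pvCellsBound n m _ _ _ _ hc3.1 hc3.2 u h
          obtain ⟨hv, hinv1⟩ := ih (PySem.Set.union occ cs) memo0 hnd' hbd' (by omega) hinv0
          rw [hv]
          exact iht _ _ hinv1 (fun cand hc => hdims cand (List.mem_cons_of_mem c hc))
      obtain ⟨h1, h2⟩ := hfold (pvCandsAll n m a b) 0 memo hinv
        (fun cand hc => pvCandsDims n m a b cand hc)
      constructor
      · rw [h1]; rfl
      · intro k v hget
        rw [PySem.Dict.get?_insert] at hget
        split at hget
        · rename_i hkk
          refine ⟨occ, f + 1, hnd, hbd, hkk, hf, ?_⟩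
          cases hget
          rw [h1]; rfl
        · exact h2 k v hget

-- ---- A-side simulation ----
theorem pvSet2_length (g : List (List Int)) (r c : Nat) (v : Int) :
    (pvSet2 g r c v).length = g.length := by
  simp [pvSet2]

theorem pvSet2_rows (g : List (List Int)) (n r c : Nat) (v : Int)
    (hn : ∀ row ∈ g, row.length = n) (hr : r < g.length) :
    ∀ row ∈ pvSet2 g r c v, row.length = n := by
  intro row hrow
  rcases List.mem_or_eq_of_mem_set hrow with h | h
  · exact hn _ h
  · subst h
    rw [List.length_set, List.getD_eq_getElem g [] hr]
    exact hn _ (List.getElem_mem hr)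

theorem pvSet2_cell (g : List (List Int)) (r c : Nat) (v : Int)
    (hr : r < g.length) (hc : c < (g.getD r []).length) (r' c' : Nat) :
    pvCellA (pvSet2 g r c v) r' c' = if r' = r ∧ c' = c then v else pvCellA g r' c' := by
  have hrow : ∀ i : Nat, (pvSet2 g r c v)[i]? =
      if i = r then some ((g.getD r []).set c v) else g[i]? := by
    intro i
    by_cases hi : i = r
    · subst hi; rw [pvSet2, List.getElem?_set_self hr, if_pos rfl]
    · rw [pvSet2, List.getElem?_set_ne (by omega : r ≠ i), if_neg hi]
  by_cases h1 : r' = r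
  · subst h1
    by_cases h2 : c' = c
    · subst h2
      have hset : ((g.getD r' []).set c' v)[c']? = some v := List.getElem?_set_self hc
      simp only [List.getD_eq_getElem?_getD] at hset
      simp [pvCellA, List.getD_eq_getElem?_getD, hrow, hset]
    · have hset : ((g.getD r' []).set c v)[c']? = (g.getD r' [])[c']? :=
        List.getElem?_set_ne (by omega : c ≠ c')
      simp only [List.getD_eq_getElem?_getD] at hset
      simp [pvCellA, List.getD_eq_getElem?_getD, hrow, hset, h2]
  · simp [pvCellA, List.getD_eq_getElem?_getD, hrow, h1]

theorem pvRowFold_spec (n px r0 : Nat) :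
    ∀ (w : Nat) (g : List (List Int)), (∀ row ∈ g, row.length = n) → r0 < g.length →
      px + w ≤ n →
      ((List.range w).foldl (fun g3 dx => pvSet2 g3 r0 (px + dx) 1) g).length = g.length ∧
      (∀ row ∈ (List.range w).foldl (fun g3 dx => pvSet2 g3 r0 (px + dx) 1) g, row.length = n) ∧
      ∀ r c, pvCellA ((List.range w).foldl (fun g3 dx => pvSet2 g3 r0 (px + dx) 1) g) r c =
        if r = r0 ∧ px ≤ c ∧ c < px + w then 1 else pvCellA g r c := by
  intro w
  induction w with
  | zero =>
    intro g hn hr0 _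
    simp only [List.range_zero, List.foldl_nil]
    exact ⟨by simp, hn, fun r c => by rw [if_neg (by rintro ⟨_, h5, h6⟩; omega)]⟩
  | succ w ihw =>
    intro g hn hr0 hpw
    rw [List.range_succ, List.foldl_append, List.foldl_cons, List.foldl_nil]
    obtain ⟨hl, hrows, hcell⟩ := ihw g hn hr0 (by omega)
    set gw := (List.range w).foldl (fun g3 dx => pvSet2 g3 r0 (px + dx) 1) g with hgw
    have hr0' : r0 < gw.length := by rw [hl]; exact hr0
    have hclen : (gw.getD r0 []).length = n := by
      rw [List.getD_eq_getElem _ _ hr0']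
      exact hrows _ (List.getElem_mem hr0')
    have hcw : px + w < (gw.getD r0 []).length := by rw [hclen]; omega
    refine ⟨by rw [pvSet2_length, hl], pvSet2_rows _ n _ _ _ hrows hr0', fun r c => ?_⟩
    rw [pvSet2_cell gw r0 (px + w) 1 hr0' hcw r c, hcell r c]
    split_ifs <;> first | rfl | omega

theorem pvPlace_spec (n px py : Nat) :
    ∀ (h w : Nat) (g : List (List Int)), (∀ row ∈ g, row.length = n) → py + h ≤ g.length →
      px + w ≤ n →
      (pvPlaceA g w h px py).length = g.length ∧
      (∀ row ∈ pvPlaceA g w h px py, row.length = n) ∧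
      ∀ r c, pvCellA (pvPlaceA g w h px py) r c =
        if py ≤ r ∧ r < py + h ∧ px ≤ c ∧ c < px + w then 1 else pvCellA g r c := by
  intro h
  induction h with
  | zero =>
    intro w g hn _ _
    simp only [pvPlaceA, List.range_zero, List.foldl_nil]
    exact ⟨by simp, hn, fun r c => by rw [if_neg (by rintro ⟨h5, h6, _⟩; omega)]⟩
  | succ h ihh =>
    intro w g hn hb hw
    obtain ⟨hl, hrows, hcell⟩ := ihh w g hn (by omega) hw
    simp only [pvPlaceA] at hl hrows hcell ⊢
    rw [List.range_succ, List.foldl_append, List.foldl_cons, List.foldl_nil]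
    obtain ⟨hl2, hrows2, hcell2⟩ := pvRowFold_spec n px (py + h) w
      ((List.range h).foldl (fun g2 dy =>
        (List.range w).foldl (fun g3 dx => pvSet2 g3 (py + dy) (px + dx) 1) g2) g)
      hrows (by rw [hl]; omega) hw
    refine ⟨by rw [hl2, hl], hrows2, fun r c => ?_⟩
    rw [hcell2 r c, hcell r c]
    split_ifs <;> first | rfl | omega

theorem pvHeadLen (g : List (List Int)) (n : Nat) (hne : g ≠ [])
    (hn : ∀ row ∈ g, row.length = n) : (g.headD []).length = n := by
  cases g with
  | nil => exact absurd rfl hne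
  | cons row rest => exact hn row List.mem_cons_self

theorem pvCanPlace_iff (g : List (List Int)) (n m w h px py : Nat) (occ : PySem.Set Nat)
    (hm : 0 < m) (hg1 : g.length = m) (hg2 : ∀ row ∈ g, row.length = n)
    (hg3 : ∀ r < m, ∀ c < n, pvCellA g r c = if r * n + c ∈ occ then 1 else 0) :
    pvCanPlaceA g w h px py = true ↔
      px + w ≤ n ∧ py + h ≤ m ∧ ∀ u ∈ pvCellsB n px py w h, u ∉ occ := by
  have hne : g ≠ [] := by intro hx; rw [hx] at hg1; simp at hg1; omega
  have hhead := pvHeadLen g n hne hg2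
  simp only [pvCanPlaceA, hhead, hg1]
  split_ifs with hbound
  · simp only [false_iff]
    rintro ⟨h1', h2', _⟩
    omega
  · push Not at hbound
    simp only [List.all_eq_true, List.mem_range]
    constructor
    · intro hall
      refine ⟨by omega, by omega, ?_⟩
      intro u hu
      simp only [pvCellsB, List.mem_flatMap, List.mem_map, List.mem_range] at hu
      obtain ⟨dy, hdy, dx, hdx, rfl⟩ := hu
      have h5 := hall dy hdy dx hdx
      rw [hg3 (py + dy) (by omega) (px + dx) (by omega)] at h5
      intro hmem
      rw [if_pos hmem] at h5
      simp at h5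
    · rintro ⟨_, _, hfree⟩ dy hdy dx hdx
      rw [hg3 (py + dy) (by omega) (px + dx) (by omega)]
      have hnm : (py + dy) * n + (px + dx) ∉ occ := hfree _ (by
        simp only [pvCellsB, List.mem_flatMap, List.mem_map, List.mem_range]
        exact ⟨dy, hdy, dx, hdx, rfl⟩)
      rw [if_neg hnm]
      rfl

theorem pvRel_place (g : List (List Int)) (n m w h px py : Nat) (occ : PySem.Set Nat)
    (hg1 : g.length = m) (hg2 : ∀ row ∈ g, row.length = n)
    (hg3 : ∀ r < m, ∀ c < n, pvCellA g r c = if r * n + c ∈ occ then 1 else 0)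
    (hw : px + w ≤ n) (hh : py + h ≤ m) :
    (pvPlaceA g w h px py).length = m ∧
    (∀ row ∈ pvPlaceA g w h px py, row.length = n) ∧
    ∀ r < m, ∀ c < n, pvCellA (pvPlaceA g w h px py) r c =
      if r * n + c ∈ PySem.Set.union occ (pvCellsB n px py w h) then 1 else 0 := by
  obtain ⟨hl, hrows, hcell⟩ := pvPlace_spec n px py h w g hg2 (by rw [hg1]; exact hh) hw
  refine ⟨by rw [hl, hg1], hrows, ?_⟩
  intro r hr c hc
  rw [hcell r c, hg3 r hr c hc]
  have hmc := pvMemCells n px py w h r c hc hw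
  have hmu := PySem.Set.mem_union occ (pvCellsB n px py w h) (r * n + c)
  split_ifs <;> first | rfl | (exfalso; tauto)

theorem pvStepEq (n m : Nat) (a b : Int) (f : Nat) (g : List (List Int)) (occ : PySem.Set Nat)
    (hm : 0 < m)
    (hg1 : g.length = m) (hg2 : ∀ row ∈ g, row.length = n)
    (hg3 : ∀ r < m, ∀ c < n, pvCellA g r c = if r * n + c ∈ occ then 1 else 0)
    (hIH : ∀ (g' : List (List Int)) (occ' : PySem.Set Nat),
      g'.length = m → (∀ row ∈ g', row.length = n) →
      (∀ r < m, ∀ c < n, pvCellA g' r c = if r * n + c ∈ occ' then 1 else 0) →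
      pvBacktrackA a b f g' = pvPure n m a b f occ')
    (w h px py : Nat) (acc : Int) :
    (if pvCanPlaceA g w h px py = true then
        max acc (1 + pvBacktrackA a b f (pvPlaceA g w h px py)) else acc) =
    (if px + w ≤ n ∧ py + h ≤ m then
        if (pvCellsB n px py w h).all (fun c => !(PySem.Set.contains occ c)) = true then
          max acc (1 + pvPure n m a b f (PySem.Set.union occ (pvCellsB n px py w h)))
        else acc
      else acc) := by
  have hiff := pvCanPlace_iff g n m w h px py occ hm hg1 hg2 hg3
  by_cases hcp : pvCanPlaceA g w h px py = true
  · obtain ⟨hw', hh', hfree⟩ := hiff.mp hcp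
    rw [if_pos hcp, if_pos ⟨hw', hh'⟩, if_pos (by
      rw [List.all_eq_true]
      intro u hu
      have h0 : PySem.Set.contains occ u = false := by
        rw [Bool.eq_false_iff]
        intro hx
        exact hfree u hu ((PySem.Set.contains_iff occ u).mp hx)
      rw [h0]
      rfl)]
    obtain ⟨e1, e2, e3⟩ := pvRel_place g n m w h px py occ hg1 hg2 hg3 hw' hh'
    rw [hIH _ _ e1 e2 e3]
  · rw [if_neg hcp]
    by_cases hb1 : px + w ≤ n ∧ py + h ≤ m
    case neg => rw [if_neg hb1]
    rw [if_pos hb1]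
    by_cases hb2 : (pvCellsB n px py w h).all (fun c => !(PySem.Set.contains occ c)) = true
    case neg => rw [if_neg hb2]
    exfalso
    apply hcp
    apply hiff.mpr
    refine ⟨hb1.1, hb1.2, ?_⟩
    intro u hu hmem
    have h5 := List.all_eq_true.mp hb2 u hu
    rw [(PySem.Set.contains_iff occ u).mpr hmem] at h5
    simp at h5

theorem pvSim (n m : Nat) (a b : Int) (hm : 0 < m) :
    ∀ (f : Nat) (g : List (List Int)) (occ : PySem.Set Nat),
      g.length = m → (∀ row ∈ g, row.length = n) →
      (∀ r < m, ∀ c < n, pvCellA g r c = if r * n + c ∈ occ then 1 else 0) →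
      pvBacktrackA a b f g = pvPure n m a b f occ := by
  intro f
  induction f with
  | zero => intro g occ _ _ _; rfl
  | succ f ih =>
    intro g occ hg1 hg2 hg3
    have hne : g ≠ [] := by intro hx; rw [hx] at hg1; simp at hg1; omega
    have hhead := pvHeadLen g n hne hg2
    simp only [pvBacktrackA, pvPure, pvCandsAll]
    rw [hg1, hhead, List.foldl_flatMap]
    apply PySem.List.foldl_congr_mem
    intro acc py hpy
    rw [List.foldl_flatMap]
    apply PySem.List.foldl_congr_mem
    intro acc1 px hpx
    by_cases hab : a = b
    · subst hab
      simp only [pvDims, ne_eq, not_true_eq_false, if_false, List.map_cons, List.map_nil,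
        List.foldl_cons, List.foldl_nil, false_and, true_and]
      exact pvStepEq n m a a f g occ hm hg1 hg2 hg3 ih a.toNat a.toNat px py acc1
    · rw [pvDims, if_pos hab]
      simp only [List.map_cons, List.map_nil, List.foldl_cons, List.foldl_nil]
      simp only [ne_eq, hab, not_false_eq_true, true_and, false_and, if_false]
      rw [pvStepEq n m a b f g occ hm hg1 hg2 hg3 ih a.toNat b.toNat px py acc1]
      exact pvStepEq n m a b f g occ hm hg1 hg2 hg3 ih b.toNat a.toNat px py _

-- ===== VERDICT (by name: the statement is the Claim_ definition above) =====
theorem max_paneles_spec : Claim_equal_max_paneles := by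
  intro a b x y _
  unfold Spec_max_paneles max_paneles max_paneles_alt
  by_cases hg : a ≤ 0 ∨ b ≤ 0 ∨ x ≤ 0 ∨ y ≤ 0
  · rw [if_pos hg, if_pos hg]
  rw [if_neg hg, if_neg hg]
  by_cases h1 : PySem.Int.mod x a = 0 ∧ PySem.Int.mod y b = 0
  · rw [if_pos (Or.inl h1), if_pos h1, if_pos h1]
  by_cases h2 : PySem.Int.mod x b = 0 ∧ PySem.Int.mod y a = 0
  · rw [if_pos (Or.inr h2), if_neg h1, if_neg h1, if_pos h2]
  rw [if_neg (by rintro (h | h); exact h1 h; exact h2 h), if_neg h1, if_neg h2]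
  push Not at hg
  obtain ⟨ha, hb, hx, hy⟩ := hg
  have hm : 0 < y.toNat := by omega
  have hinit1 : (List.replicate y.toNat (List.replicate x.toNat (0 : Int))).length = y.toNat := by
    simp
  have hinit2 : ∀ row ∈ List.replicate y.toNat (List.replicate x.toNat (0 : Int)),
      row.length = x.toNat := by
    intro row hrow
    rw [List.eq_of_mem_replicate hrow]
    simp
  have hinit3 : ∀ r < y.toNat, ∀ c < x.toNat,
      pvCellA (List.replicate y.toNat (List.replicate x.toNat (0 : Int))) r c =
        if r * x.toNat + c ∈ PySem.Set.empty then 1 else 0 := by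
    intro r hr c hc
    have : r * x.toNat + c ∉ (PySem.Set.empty : PySem.Set Nat) := by
      simp [PySem.Set.empty]
    rw [if_neg this]
    simp [pvCellA, List.getD_eq_getElem?_getD, hr, hc]
  have hsim := pvSim x.toNat y.toNat a b hm (x.toNat * y.toNat + 1)
    (List.replicate y.toNat (List.replicate x.toNat (0 : Int))) PySem.Set.empty
    hinit1 hinit2 hinit3
  have hempty : pvInv x.toNat y.toNat a b PySem.Dict.empty := by
    intro k v hget
    simp [PySem.Dict.empty, PySem.Dict.get?] at hget
  have hbest := pvBest_spec x.toNat y.toNat a b ha hb (x.toNat * y.toNat + 1)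
    PySem.Set.empty PySem.Dict.empty (by simp [PySem.Set.empty])
    (by simp [PySem.Set.empty]) (by simp [PySem.Set.empty]) hempty
  rw [hsim, ← hbest.1]
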